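-- pv_equiv track=rewrite | github.com/zahidur124/Python-Projects | Print Checkerboard.py | alternate_line
-- ===== SOURCE A (Python) =====
-- def new_line(n):
--     x = ""
--     while n>0:
--         if n%2 ==0:
--             x= x + "#"
--             n = n -1
--         else:
--             x = x + " "
--             n = n - 1
--     return x
--
-- def alternate_line(n):
--     y =""
--     val = new_line(n)
--     for x in val:
--         if x.isspace() == True:
--             y = y + "#"
--             n = n - 1
--         else:
--             y = y + " "
--             n = n - 1
--     return y
-- ===== SOURCE B (Python) =====
-- def alternate_line(n):
--     parts = []
--     i = n
--     while i > 0: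
--         parts.append("#" if i % 2 != 0 else " ")
--         i = i - 1
--     return "".join(parts)
-- ===== Notes on version B (the rewrite author's own statement) =====
-- stated objective: simpler
-- what changed: B emits the final character directly from the counter's parity (odd -> '#', even -> ' ') in a single loop collected into a list and joined, instead of A's two passes that first build an intermediate string via a helper and then invert each character with isspace plus quadratic string concatenation.
import Mathlib
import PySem

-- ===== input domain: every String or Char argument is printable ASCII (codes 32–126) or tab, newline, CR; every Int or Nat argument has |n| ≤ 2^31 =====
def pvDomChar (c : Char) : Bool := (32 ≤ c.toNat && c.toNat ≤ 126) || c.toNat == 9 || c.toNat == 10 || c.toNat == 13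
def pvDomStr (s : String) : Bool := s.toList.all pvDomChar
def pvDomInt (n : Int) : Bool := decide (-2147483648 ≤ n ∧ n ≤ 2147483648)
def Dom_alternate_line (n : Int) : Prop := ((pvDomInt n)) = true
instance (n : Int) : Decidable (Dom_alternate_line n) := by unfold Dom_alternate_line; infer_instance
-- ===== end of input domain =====

-- B emits each character directly from the counter's parity in one loop instead of A's
-- build-then-invert two passes; objective: simpler.


-- ===== PORT A =====
-- helper new_line: while n>0 append '#' (n even) or ' ' (n odd), decrementing n
def newLineGo (n : Int) (x : String) : String :=
  if n > 0 then
    if PySem.Int.mod n 2 = 0 then newLineGo (n - 1) (x ++ "#")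
    else newLineGo (n - 1) (x ++ " ")
  else x
termination_by n.toNat
decreasing_by all_goals omega

-- second pass: for each char of new_line(n), append '#' if it is a space else ' '
-- (A also decrements n inside this loop; that n is never read afterwards)
def alternate_line (n : Int) : String :=
  (newLineGo n "").toList.foldl
    (fun y x => if PySem.Chars.isspace x = true then y ++ "#" else y ++ " ") ""

-- ===== PORT B =====
def altGo (i : Int) (parts : List String) : List String :=
  if i > 0 then altGo (i - 1) (parts ++ [if PySem.Int.mod i 2 ≠ 0 then "#" else " "])
  else parts
termination_by i.toNat
decreasing_by all_goals omega

def alternate_line_alt (n : Int) : String := String.join (altGo n [])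

-- ===== PRECONDITION & SPEC =====
def Spec_alternate_line (n : Int) (out : String) : Prop := out = alternate_line_alt n
instance (n : Int) (out : String) : Decidable (Spec_alternate_line n out) := by unfold Spec_alternate_line; infer_instance

-- ===== CLAIM (what is proved, stated in full; the proofs are below) =====
def Claim_equal_alternate_line : Prop := ∀ (n : Int), Dom_alternate_line n → Spec_alternate_line n (alternate_line n)

-- ===== LEMMAS AND PROOFS =====

def pvInv (c : Char) : Char := if PySem.Chars.isspace c then '#' else ' '

theorem newLineGo_acc (n : Int) (x : String) :
    (newLineGo n x).toList = x.toList ++ (newLineGo n "").toList := by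
  induction hk : n.toNat generalizing n x with
  | zero =>
    have hn : ¬ n > 0 := by omega
    unfold newLineGo; simp [hn]
  | succ k ih =>
    by_cases hn : n > 0
    · have hk' : (n - 1).toNat = k := by omega
      unfold newLineGo
      rw [if_pos hn, if_pos hn]
      by_cases hm : PySem.Int.mod n 2 = 0
      · rw [if_pos hm, if_pos hm,
          ih (n-1) (x ++ "#") hk', ih (n-1) ("" ++ "#") hk']
        simp
      · rw [if_neg hm, if_neg hm,
          ih (n-1) (x ++ " ") hk', ih (n-1) ("" ++ " ") hk']
        simp
    · unfold newLineGo; simp [hn]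

theorem altGo_acc (i : Int) (parts : List String) :
    altGo i parts = parts ++ altGo i [] := by
  induction hk : i.toNat generalizing i parts with
  | zero =>
    have hn : ¬ i > 0 := by omega
    unfold altGo; simp [hn]
  | succ k ih =>
    by_cases hn : i > 0
    · have hk' : (i - 1).toNat = k := by omega
      unfold altGo
      rw [if_pos hn, if_pos hn]
      simp only [List.nil_append]
      rw [ih (i-1) (parts ++ [if PySem.Int.mod i 2 ≠ 0 then "#" else " "]) hk',
        ih (i-1) ([if PySem.Int.mod i 2 ≠ 0 then "#" else " "]) hk']
      simp
    · unfold altGo; simp [hn]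

theorem fold_inv (l : List Char) (y : String) :
    (l.foldl (fun y x => if PySem.Chars.isspace x = true then y ++ "#" else y ++ " ") y).toList
      = y.toList ++ l.map pvInv := by
  induction l generalizing y with
  | nil => simp
  | cons c t ih =>
    simp only [List.foldl, List.map]
    by_cases h : PySem.Chars.isspace c = true <;>
      simp [h, ih, pvInv]

theorem join_acc (l : List String) (a : String) :
    (l.foldl (fun r s => r ++ s) a).toList
      = a.toList ++ (l.foldl (fun r s => r ++ s) "").toList := by
  induction l generalizing a with
  | nil => simp
  | cons h t ih =>
    simp only [List.foldl]
    rw [ih (a ++ h), ih ("" ++ h)]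
    simp

theorem main_eq (n : Int) :
    ((newLineGo n "").toList).map pvInv = (String.join (altGo n [])).toList := by
  induction hk : n.toNat generalizing n with
  | zero =>
    have hn : ¬ n > 0 := by omega
    unfold newLineGo altGo; simp [hn, String.join]
  | succ k ih =>
    by_cases hn : n > 0
    · have hk' : (n - 1).toNat = k := by omega
      rw [newLineGo.eq_def, altGo.eq_def]
      rw [if_pos hn, if_pos hn]
      by_cases hm : PySem.Int.mod n 2 = 0
      · rw [if_pos hm, if_neg (show ¬ PySem.Int.mod n 2 ≠ 0 by simpa using hm)]
        rw [newLineGo_acc, altGo_acc]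
        simp [String.join, pvInv, PySem.Chars.isspace, ih (n-1) hk']
        rw [join_acc (altGo (n-1) []) " "]
        simp
      · rw [if_neg hm, if_pos hm]
        rw [newLineGo_acc, altGo_acc]
        simp [String.join, pvInv, PySem.Chars.isspace, ih (n-1) hk']
        rw [join_acc (altGo (n-1) []) "#"]
        simp
    · unfold newLineGo altGo; simp [hn, String.join]

-- ===== VERDICT (by name: the statement is the Claim_ definition above) =====
theorem alternate_line_spec : Claim_equal_alternate_line := by
  intro n _
  unfold Spec_alternate_line alternate_line alternate_line_alt
  have h := fold_inv (newLineGo n "").toList ""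
  rw [main_eq] at h
  exact String.toList_inj.mp (by simpa using h)
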